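-- pv_equiv track=rewrite | github.com/manojnayakkuna/leetcode_easy | problems/leetcode_450_base7.py | convertToBase7_alt
-- ===== SOURCE A (Python) =====
-- def convertToBase7_alt(num):
--     if not num:
--         return str(num)
--     base7val = []
--     sign = '-' if num < 0 else ''
--     num = abs(num)
--     while num:
--         lastBit = num % 7
--         num = num // 7
--         base7val.append(str(lastBit))
--     base7val.append(sign)
--     return ''.join(base7val[::-1])
-- ===== SOURCE B (Python) =====
-- def convertToBase7_alt(num):
--     if num < 0:
--         return '-' + convertToBase7_alt(-num)
--     if num < 7:
--         return str(num)
--     return convertToBase7_alt(num // 7) + str(num % 7)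
-- ===== Notes on version B (the rewrite author's own statement) =====
-- stated objective: simpler
-- what changed: Replaces the digit-accumulating while loop with list reversal and join by a three-line recursion that emits digits most-significant-first via the call stack (sign handled by one recursive call on -num).
import Mathlib
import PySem

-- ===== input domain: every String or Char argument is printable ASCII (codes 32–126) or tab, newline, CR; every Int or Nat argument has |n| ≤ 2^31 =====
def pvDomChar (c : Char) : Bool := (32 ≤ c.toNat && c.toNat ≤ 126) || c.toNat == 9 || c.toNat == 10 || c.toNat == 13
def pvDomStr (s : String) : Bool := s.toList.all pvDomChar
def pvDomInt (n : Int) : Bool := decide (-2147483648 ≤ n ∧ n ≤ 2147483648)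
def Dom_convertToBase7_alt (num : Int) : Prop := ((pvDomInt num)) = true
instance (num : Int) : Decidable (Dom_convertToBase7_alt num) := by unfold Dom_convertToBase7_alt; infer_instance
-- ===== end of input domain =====

-- B replaces A's digit list + reversal + join by a short recursion emitting digits most-significant-first.

-- ===== PORT A =====
-- the 'while num:' loop: num = abs of the original, hence a Nat; appends str(num % 7) and divides by 7
def pvLoopA (n : Nat) (acc : List String) : List String :=
  if h : n = 0 then acc
  else pvLoopA (n / 7) (acc ++ [PySem.Int.toStr ((n % 7 : Nat) : Int)])
termination_by n
decreasing_by exact Nat.div_lt_self (Nat.pos_of_ne_zero h) (by norm_num)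

def convertToBase7_alt (num : Int) : String :=
  if num = 0 then PySem.Int.toStr num
  else
    let sign : String := if num < 0 then "-" else ""
    let base7val := pvLoopA num.natAbs [] ++ [sign]
    PySem.Str.join "" ((PySem.List.slice? base7val none none (-1)).getD [])

-- ===== PORT B =====
def convertToBase7_alt_alt (num : Int) : String :=
  if num < 0 then "-" ++ convertToBase7_alt_alt (-num)
  else if num < 7 then PySem.Int.toStr num
  else convertToBase7_alt_alt (PySem.Int.floordiv num 7) ++ PySem.Int.toStr (PySem.Int.mod num 7)
termination_by ((if num < 0 then 1 else 0 : Nat), num.natAbs)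
decreasing_by
  · simp only [if_neg (by omega : ¬ (-num < 0)), if_pos (by assumption)]
    exact Prod.Lex.left _ _ (by omega)
  · have h1 : ¬ num < 0 := by assumption
    have heq : PySem.Int.floordiv num 7 = num / 7 :=
      PySem.Int.floordiv_eq_ediv_of_pos (by norm_num)
    have hm : num = (num.toNat : Int) := by omega
    have key : ((num.toNat / 7 : Nat) : Int) = (num.toNat : Int) / 7 := by
      rw [Int.natCast_div]; norm_num
    have hlt : num / 7 < num := by
      rw [hm, ← key]
      exact_mod_cast Nat.div_lt_self (by omega) (by norm_num)
    have hge : 0 ≤ num / 7 := by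
      rw [hm, ← key]; exact Int.natCast_nonneg _
    rw [heq]
    simp only [if_neg (by omega : ¬ num / 7 < 0), if_neg h1]
    exact Prod.Lex.right 0 (by omega)

-- ===== PRECONDITION & SPEC =====
def Spec_convertToBase7_alt (num : Int) (out : String) : Prop := out = convertToBase7_alt_alt num
instance (num : Int) (out : String) : Decidable (Spec_convertToBase7_alt num out) := by unfold Spec_convertToBase7_alt; infer_instance

-- ===== CLAIM (what is proved, stated in full; the proofs are below) =====
def Claim_equal_convertToBase7_alt : Prop := ∀ (num : Int), Dom_convertToBase7_alt num → Spec_convertToBase7_alt num (convertToBase7_alt num)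

-- ===== LEMMAS AND PROOFS =====

-- the loop's accumulator just prepends
theorem pvLoopA_acc (n : Nat) (acc : List String) :
    pvLoopA n acc = acc ++ pvLoopA n [] := by
  induction n using Nat.strong_induction_on generalizing acc with
  | _ n ih =>
    by_cases h : n = 0
    · simp [pvLoopA, h]
    · have hlt : n / 7 < n := Nat.div_lt_self (Nat.pos_of_ne_zero h) (by norm_num)
      conv_lhs => rw [pvLoopA]
      conv_rhs => rw [pvLoopA]
      simp only [dif_neg h, List.nil_append]
      rw [ih _ hlt (acc ++ [PySem.Int.toStr ((n % 7 : Nat) : Int)]),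
          ih _ hlt [PySem.Int.toStr ((n % 7 : Nat) : Int)]]
      simp

-- ''.join concatenates
theorem join_empty_sep (l : List String) :
    PySem.Str.join "" l = String.ofList (l.map String.toList).flatten := by
  have : ∀ (m : List (List Char)), List.intercalate ([] : List Char) m = m.flatten := by
    intro m
    induction m with
    | nil => simp [List.intercalate]
    | cons a t ih => cases t <;> simp_all [List.intercalate, List.intersperse]
  simp [PySem.Str.join, PySem.Chars.join, this]

-- core: joined reversed digits of a positive n equal B's recursion on n
theorem pvLoop_eq_alt : ∀ (n : Nat), 0 < n →
    ((pvLoopA n []).reverse.map String.toList).flatten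
      = (convertToBase7_alt_alt (n : Int)).toList := by
  intro n
  induction n using Nat.strong_induction_on with
  | _ n ih =>
    intro h
    have hn0 : n ≠ 0 := Nat.pos_iff_ne_zero.mp h
    have hnneg : ¬ ((n : Int) < 0) := not_lt.mpr (Int.natCast_nonneg n)
    rw [pvLoopA]
    simp only [dif_neg hn0, List.nil_append]
    rw [pvLoopA_acc]
    by_cases h7 : n < 7
    · have hdiv : n / 7 = 0 := Nat.div_eq_of_lt h7
      have hmod : n % 7 = n := Nat.mod_eq_of_lt h7
      rw [hdiv, hmod, pvLoopA]
      rw [convertToBase7_alt_alt]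
      simp only [if_neg hnneg, if_pos (by exact_mod_cast h7 : (n : Int) < 7)]
      simp
    · have hlt : n / 7 < n := Nat.div_lt_self h (by norm_num)
      have hpos : 0 < n / 7 := Nat.div_pos (by omega) (by norm_num)
      have hfd : PySem.Int.floordiv (n : Int) 7 = ((n / 7 : Nat) : Int) := by
        exact_mod_cast PySem.Int.floordiv_natCast n 7
      have hmd : PySem.Int.mod (n : Int) 7 = ((n % 7 : Nat) : Int) := by
        exact_mod_cast PySem.Int.mod_natCast n 7
      rw [convertToBase7_alt_alt]
      simp only [if_neg hnneg, if_neg (by exact_mod_cast h7 : ¬ ((n : Int) < 7)), hfd, hmd]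
      rw [String.toList_append, ← ih _ hlt hpos]
      simp

-- ===== VERDICT (by name: the statement is the Claim_ definition above) =====
theorem convertToBase7_alt_spec : Claim_equal_convertToBase7_alt := by
  intro num _
  unfold Spec_convertToBase7_alt
  by_cases h0 : num = 0
  · subst h0
    rw [convertToBase7_alt, convertToBase7_alt_alt]
    norm_num
  · rw [convertToBase7_alt]
    simp only [if_neg h0, PySem.List.slice?_none_none_neg_one, Option.getD_some,
      List.reverse_append, List.reverse_singleton, List.singleton_append,
      join_empty_sep, List.map_cons, List.flatten_cons]
    rw [pvLoop_eq_alt num.natAbs (by omega)]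
    rcases lt_or_gt_of_ne h0 with hneg | hpos
    · have habs : ((num.natAbs : Nat) : Int) = -num := by omega
      rw [habs]
      simp only [if_pos hneg]
      conv_rhs => rw [convertToBase7_alt_alt]
      simp only [if_pos hneg]
      rw [← String.toList_append, String.ofList_toList]
    · have habs : ((num.natAbs : Nat) : Int) = num := by omega
      rw [habs]
      simp only [if_neg (by omega : ¬ num < 0)]
      simp
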